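-- pv_equiv track=rewrite | github.com/tjdms4327/Baekjoon_Python | 백준/Bronze/34434. snails/snails.py | nautilus_sequence
-- ===== SOURCE A (Python) =====
-- def nautilus_sequence(lst):
--     for i in range(len(lst)):
--         if i < 4:
--             if lst[i]!=i:
--                 return False
--         else:
--             if lst[i] != sum(lst[i-4:i]):
--                 return False
--     return True
-- ===== SOURCE B (Python) =====
-- def nautilus_sequence(lst):
--     # generate the canonical nautilus sequence lazily (from its own last-four window,
--     # never reading lst), then compare lst against it element-wise
--     def canon(n):
--         w = []
--         for i in range(n):
--             v = i if i < 4 else sum(w)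
--             yield v
--             w.append(v)
--             if len(w) > 4:
--                 w.pop(0)
--     return all(a == b for a, b in zip(canon(len(lst)), lst))
-- ===== Notes on version B (the rewrite author's own statement) =====
-- stated objective: alternative
-- what changed: Instead of A's validating scan that indexes lst and sums slices of lst, B generates the canonical nautilus sequence with a generator that works purely from its own sliding last-four window (never reading lst) and separately compares lst against that generated stream via zip/all; validation becomes generate-then-compare.
import Mathlib
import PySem

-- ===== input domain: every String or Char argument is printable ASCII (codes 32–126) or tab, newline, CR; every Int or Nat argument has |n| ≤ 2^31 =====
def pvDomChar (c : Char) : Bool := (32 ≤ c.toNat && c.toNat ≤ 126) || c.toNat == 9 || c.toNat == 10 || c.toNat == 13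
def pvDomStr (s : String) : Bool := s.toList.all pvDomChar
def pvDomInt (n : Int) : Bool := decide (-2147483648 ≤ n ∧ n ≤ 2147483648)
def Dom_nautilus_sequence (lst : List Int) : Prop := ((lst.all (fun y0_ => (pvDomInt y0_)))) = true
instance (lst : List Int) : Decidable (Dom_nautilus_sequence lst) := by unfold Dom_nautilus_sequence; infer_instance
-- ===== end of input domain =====

-- B replaces A's validating scan (which indexes lst and sums slices of lst) by a
-- generate-then-compare decomposition: a generator produces the canonical nautilus
-- sequence from its own sliding last-four window, never reading lst, and zip/all
-- compares lst against that stream (objective: alternative).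


-- ===== PORT A =====
-- the 'for i in range(len(lst))' loop with its two early 'return False's
def pvLoopA (lst : List Int) : List Int → Bool
  | [] => true
  | i :: rest =>
    if i < 4 then
      if PySem.List.pyGetD lst i 0 ≠ i then false else pvLoopA lst rest
    else
      if PySem.List.pyGetD lst i 0 ≠ (PySem.List.slice lst (some (i - 4)) (some i)).sum then false
      else pvLoopA lst rest

def nautilus_sequence (lst : List Int) : Bool :=
  pvLoopA lst (PySem.List.pyRange 0 lst.length 1)

-- ===== PORT B =====
-- Source B's generator canon(n) fused with the lazy 'all(a == b for a, b in zip(canon(len(lst)), lst))'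
-- consumer (Lean has no lazy generators; the fused recursion is the exact same computation:
-- each yielded v is compared with the next element of lst, stopping at the first mismatch).
def pvLoopB : List Int → List Int → List Int → Bool
  | _, [], _ => true
  | _, _ :: _, [] => true
  | w, i :: is, x :: xs =>
    let v := if i < 4 then i else w.sum
    if x == v then
      let w' := w ++ [v]
      pvLoopB (if 4 < w'.length then w'.drop 1 else w') is xs
    else false

def nautilus_sequence_alt (lst : List Int) : Bool :=
  pvLoopB [] (PySem.List.pyRange 0 lst.length 1) lst

-- ===== PRECONDITION & SPEC =====
def Spec_nautilus_sequence (lst : List Int) (out : Bool) : Prop := out = nautilus_sequence_alt lst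
instance (lst : List Int) (out : Bool) : Decidable (Spec_nautilus_sequence lst out) := by unfold Spec_nautilus_sequence; infer_instance

-- ===== CLAIM (what is proved, stated in full; the proofs are below) =====
def Claim_equal_nautilus_sequence : Prop := ∀ (lst : List Int), Dom_nautilus_sequence lst → Spec_nautilus_sequence lst (nautilus_sequence lst)

-- ===== LEMMAS AND PROOFS =====

-- the canonical nautilus sequence of length n (proof-side characterisation)
def pvCanon : Nat → List Int
  | 0 => []
  | n + 1 =>
    pvCanon n ++ [if n < 4 then (n : Int) else ((pvCanon n).drop (n - 4)).sum]

theorem pvCanon_length (n : Nat) : (pvCanon n).length = n := by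
  induction n with
  | zero => rfl
  | succ n ih => simp [pvCanon, ih]

theorem pvCanon_take {m n : Nat} (h : m ≤ n) : (pvCanon n).take m = pvCanon m := by
  induction n with
  | zero => simp_all [pvCanon]
  | succ n ih =>
    rcases Nat.lt_or_ge m (n + 1) with hm | hm
    · have hmn : m ≤ n := Nat.lt_succ_iff.mp hm
      rw [pvCanon, List.take_append_of_le_length (by rw [pvCanon_length]; exact hmn)]
      exact ih hmn
    · have : m = n + 1 := le_antisymm h hm
      subst this
      exact List.take_of_length_le (by rw [pvCanon_length])

theorem pvCanon_getElem {k n : Nat} (h : k < n) :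
    (pvCanon n)[k]'(by rw [pvCanon_length]; exact h) =
      (if k < 4 then (k : Int) else ((pvCanon k).drop (k - 4)).sum) := by
  have htake : (pvCanon n).take (k + 1) = pvCanon (k + 1) := pvCanon_take h
  have : (pvCanon n)[k]'(by rw [pvCanon_length]; exact h) =
      ((pvCanon n).take (k + 1))[k]'(by
        rw [List.length_take, pvCanon_length]; omega) := by
    simp [List.getElem_take]
  rw [this]
  simp only [htake, pvCanon]
  have hlen : (pvCanon k).length = k := pvCanon_length k
  rw [List.getElem_append_right (by omega)]
  simp [hlen]

-- A's loop from index k onward decides lst = pvCanon n, given a matching prefix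
theorem pvLoopA_spec (lst : List Int) (n : Nat) (hlen : lst.length = n) :
    ∀ (j k : Nat), k + j = n → lst.take k = pvCanon k →
      pvLoopA lst (PySem.List.pyRange k n 1) = decide (lst = pvCanon n) := by
  intro j
  induction j with
  | zero =>
    intro k hk hpre
    have hk' : k = n := by omega
    rw [PySem.List.pyRange_one_eq_nil (by omega)]
    have hl : lst = pvCanon n := by
      rw [← hk', ← hpre, List.take_of_length_le (by omega)]
    rw [hl]
    simp [pvLoopA]
  | succ j ih =>
    intro k hk hpre
    have hkn : k < n := by omega
    rw [PySem.List.pyRange_one_cons (by exact_mod_cast hkn)]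
    have hget : PySem.List.pyGetD lst (k : Int) 0 = lst[k]'(by omega) := by
      rw [PySem.List.pyGetD_natCast]
      exact List.getD_eq_getElem _ _ (by omega)
    have hval : ¬ k < 4 → (PySem.List.slice lst (some ((k : Int) - 4)) (some (k : Int))).sum
        = ((pvCanon k).drop (k - 4)).sum := by
      intro h4
      rw [show (k : Int) - 4 = ((k - 4 : Nat) : Int) by omega,
        PySem.List.slice_natCast, ← hpre, List.drop_take]
    have hcanonk : (pvCanon n)[k]'(by rw [pvCanon_length]; exact hkn)
        = (if k < 4 then (k : Int) else ((pvCanon k).drop (k - 4)).sum) :=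
      pvCanon_getElem hkn
    have hstep : pvLoopA lst ((k : Int) :: PySem.List.pyRange ((k : Int) + 1) (n : Int) 1)
        = (if lst[k]'(by omega) ≠ (if k < 4 then (k : Int) else ((pvCanon k).drop (k - 4)).sum)
           then false else pvLoopA lst (PySem.List.pyRange ((k : Int) + 1) (n : Int) 1)) := by
      by_cases h4 : k < 4
      · simp only [pvLoopA]
        rw [if_pos (show (k : Int) < 4 by exact_mod_cast h4), if_pos h4, hget]
      · simp only [pvLoopA]
        rw [if_neg (show ¬ ((k : Int) < 4) by exact_mod_cast h4), if_neg h4, hget, hval h4]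
    rw [hstep]
    by_cases heq : lst[k]'(by omega)
        = (if k < 4 then (k : Int) else ((pvCanon k).drop (k - 4)).sum)
    · have hpre' : lst.take (k + 1) = pvCanon (k + 1) := by
        rw [List.take_add_one, List.getElem?_eq_getElem (by omega), hpre, pvCanon]
        simp [heq]
      rw [if_neg (by simpa using heq),
        show ((k : Int) + 1) = ((k + 1 : Nat) : Int) by push_cast; ring]
      exact ih (k + 1) (by omega) hpre'
    · have hlne : lst ≠ pvCanon n := by
        intro hcontr
        exact heq (by rw [← hcanonk]; subst hcontr; rfl)
      rw [if_pos (by simpa using heq)]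
      simp [hlne]

-- B's fused generate/compare loop from index k onward decides lst = pvCanon n
theorem pvLoopB_spec (lst : List Int) (n : Nat) (hlen : lst.length = n) :
    ∀ (j k : Nat), k + j = n → lst.take k = pvCanon k →
      pvLoopB ((pvCanon k).drop (k - 4)) (PySem.List.pyRange k n 1) (lst.drop k)
        = decide (lst = pvCanon n) := by
  intro j
  induction j with
  | zero =>
    intro k hk hpre
    have hk' : k = n := by omega
    rw [PySem.List.pyRange_one_eq_nil (by omega)]
    have hl : lst = pvCanon n := by
      rw [← hk', ← hpre, List.take_of_length_le (by omega)]
    rw [hl]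
    simp [pvLoopB]
  | succ j ih =>
    intro k hk hpre
    have hkn : k < n := by omega
    rw [PySem.List.pyRange_one_cons (by exact_mod_cast hkn),
      List.drop_eq_getElem_cons (show k < lst.length by omega)]
    -- the generated value at step k is pvCanon's entry there
    have hv : (if (k : Int) < 4 then (k : Int) else ((pvCanon k).drop (k - 4)).sum)
        = (if k < 4 then (k : Int) else ((pvCanon k).drop (k - 4)).sum) := by
      by_cases h4 : k < 4
      · rw [if_pos (show (k : Int) < 4 by exact_mod_cast h4), if_pos h4]
      · rw [if_neg (show ¬ ((k : Int) < 4) by exact_mod_cast h4), if_neg h4]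
    have hcanonk : (pvCanon n)[k]'(by rw [pvCanon_length]; exact hkn)
        = (if k < 4 then (k : Int) else ((pvCanon k).drop (k - 4)).sum) :=
      pvCanon_getElem hkn
    simp only [pvLoopB, hv]
    by_cases heq : lst[k]'(by omega)
        = (if k < 4 then (k : Int) else ((pvCanon k).drop (k - 4)).sum)
    · -- match: the updated window is pvCanon (k+1)'s last-four window, recurse
      have hpre' : lst.take (k + 1) = pvCanon (k + 1) := by
        rw [List.take_add_one, List.getElem?_eq_getElem (by omega), hpre, pvCanon]
        simp [heq]
      have hwin : (pvCanon k).drop (k - 4)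
            ++ [if k < 4 then (k : Int) else ((pvCanon k).drop (k - 4)).sum]
          = (pvCanon (k + 1)).drop (k - 4) := by
        rw [pvCanon, List.drop_append_of_le_length (by rw [pvCanon_length]; omega)]
      have hwlen : ((pvCanon (k + 1)).drop (k - 4)).length = (k + 1) - (k - 4) := by
        rw [List.length_drop, pvCanon_length]
      have hnext : (if 4 < ((pvCanon (k + 1)).drop (k - 4)).length
            then ((pvCanon (k + 1)).drop (k - 4)).drop 1
            else (pvCanon (k + 1)).drop (k - 4))
          = (pvCanon (k + 1)).drop (k + 1 - 4) := by
        by_cases h4 : k < 4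
        · rw [if_neg (by rw [hwlen]; omega)]
          congr 1
          omega
        · rw [if_pos (by rw [hwlen]; omega), List.drop_drop]
          congr 1
          omega
      rw [if_pos (by simpa using heq), hwin, hnext,
        show ((k : Int) + 1) = ((k + 1 : Nat) : Int) by omega]
      exact ih (k + 1) (by omega) hpre'
    · -- mismatch: lst disagrees with pvCanon n at index k
      have hlne : lst ≠ pvCanon n := by
        intro hcontr
        exact heq (by rw [← hcanonk]; subst hcontr; rfl)
      rw [if_neg (by simpa using heq)]
      simp [hlne]

-- ===== VERDICT (by name: the statement is the Claim_ definition above) =====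
theorem nautilus_sequence_spec : Claim_equal_nautilus_sequence := by
  intro lst _
  unfold Spec_nautilus_sequence nautilus_sequence nautilus_sequence_alt
  have hA := pvLoopA_spec lst lst.length rfl lst.length 0 (by omega) (by simp [pvCanon])
  have hB := pvLoopB_spec lst lst.length rfl lst.length 0 (by omega) (by simp [pvCanon])
  simp only [Nat.cast_zero] at hA hB
  simp only [pvCanon, List.drop_nil, List.drop_zero] at hB
  rw [hA, hB]
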